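-- pv_equiv track=rewrite | github.com/artbohr/Codewars-Algorithms-Python- | 7-kyu/string-reversal-spaces.py | solve
-- ===== SOURCE A (Python) =====
-- def solve(s):
--     output = ''
--     iter = 0
--     q = s[::-1].replace(" ", "")
--
--     for i in range(len(s)):
--         if s[i] == ' ':
--             output += ' '
--         else:
--             output += q[iter]
--             iter += 1
--
--     return output
-- ===== SOURCE B (Python) =====
-- def solve(s):
--     lst = list(s)
--     i, j = 0, len(lst) - 1
--     while i < j:
--         if lst[i] == ' ':
--             i += 1
--         elif lst[j] == ' ':
--             j -= 1
--         else:
--             lst[i], lst[j] = lst[j], lst[i]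
--             i += 1
--             j -= 1
--     return ''.join(lst)
-- ===== Notes on version B (the rewrite author's own statement) =====
-- stated objective: alternative
-- what changed: Replaces A's two-pass scheme (build the reversed space-stripped copy, then scan s appending from it into a growing string) with a single in-place two-pointer pass over list(s) that swaps non-space characters from the two converging ends, leaving spaces fixed.
import Mathlib
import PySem

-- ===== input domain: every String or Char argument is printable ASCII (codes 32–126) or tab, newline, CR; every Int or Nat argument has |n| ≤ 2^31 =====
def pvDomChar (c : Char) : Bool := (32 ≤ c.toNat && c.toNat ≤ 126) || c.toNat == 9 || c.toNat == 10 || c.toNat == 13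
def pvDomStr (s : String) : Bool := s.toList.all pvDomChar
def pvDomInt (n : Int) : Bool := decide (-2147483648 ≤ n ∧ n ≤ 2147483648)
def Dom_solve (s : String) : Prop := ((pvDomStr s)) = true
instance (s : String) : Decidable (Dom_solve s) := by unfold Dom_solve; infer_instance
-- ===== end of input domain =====

-- B replaces A's two-pass scheme (reversed space-stripped copy, then an append pass) with a
-- single in-place two-pointer swap pass; the return values are proved equal on all strings.

-- ===== PORT A =====
-- output = ''; iter = 0; q = s[::-1].replace(" ", "");
-- for i in range(len(s)): if s[i]==' ': output += ' ' else: output += q[iter]; iter += 1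
-- (q[iter] is ported with pyGetD: iter never reaches len(q), so the default is never used)
def solve (s : String) : String :=
  let q : String := PySem.Str.replace ((PySem.Str.slice? s none none (-1)).getD "") " " ""
  let st :=
    (PySem.List.pyRange 0 (PySem.Str.len s) 1).foldl
      (fun (st : List Char × Int) i =>
        if PySem.List.pyGetD s.toList i ' ' = ' ' then (st.1 ++ [' '], st.2)
        else (st.1 ++ [PySem.List.pyGetD q.toList st.2 ' '], st.2 + 1))
      ([], 0)
  String.ofList st.1

-- ===== PORT B =====
-- lst = list(s); i, j = 0, len(lst)-1
-- while i < j: skip a space at i / skip a space at j / swap lst[i], lst[j]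
-- (i and j stay in range whenever they are read, so List.getD's default is never used)
def solveAltLoop (cs : List Char) (i j : Nat) : List Char :=
  if _h : i < j then
    if cs.getD i ' ' = ' ' then solveAltLoop cs (i + 1) j
    else if cs.getD j ' ' = ' ' then solveAltLoop cs i (j - 1)
    else solveAltLoop ((cs.set i (cs.getD j ' ')).set j (cs.getD i ' ')) (i + 1) (j - 1)
  else cs
termination_by j - i

def solve_alt (s : String) : String :=
  String.ofList (solveAltLoop s.toList 0 (s.toList.length - 1))

-- ===== PRECONDITION & SPEC =====
def Spec_solve (s : String) (out : String) : Prop := out = solve_alt s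
instance (s : String) (out : String) : Decidable (Spec_solve s out) := by unfold Spec_solve; infer_instance

-- ===== CLAIM (what is proved, stated in full; the proofs are below) =====
def Claim_equal_solve : Prop := ∀ (s : String), Dom_solve s → Spec_solve s (solve s)

-- ===== LEMMAS AND PROOFS =====

-- the non-space characters of cs, in order
def pvNS (cs : List Char) : List Char := cs.filter (fun c => c != ' ')

-- place the characters of q, in order, into the non-space slots of the template list
def pvFill (q : List Char) : List Char → List Char
  | [] => []
  | c :: t => if c = ' ' then ' ' :: pvFill q t else q.headD ' ' :: pvFill q.tail t
theorem pv_replace_go (fuel : Nat) : ∀ (l acc : List Char), l.length ≤ fuel →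
    PySem.Chars.replace.go [' '] [] fuel l acc = acc.reverse ++ pvNS l := by
  induction fuel with
  | zero =>
    intro l acc h
    have : l = [] := List.eq_nil_of_length_eq_zero (Nat.le_zero.mp h)
    subst this; simp [PySem.Chars.replace.go, pvNS]
  | succ n ih =>
    intro l acc h
    match l with
    | [] => simp [PySem.Chars.replace.go, pvNS]
    | c :: t =>
      rw [PySem.Chars.replace.go]
      by_cases hc : c = ' '
      · subst hc
        simp only [List.isPrefixOf, BEq.rfl, Bool.and_eq_true]
        simp [ih t acc (by simpa using h), pvNS]
      · have hp : ¬ ([' '].isPrefixOf (c :: t) = true) := by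
          simp [List.isPrefixOf]
          exact fun he => hc he.symm
        simp only [hp]
        rw [ih t (c :: acc) (by simpa using h)]
        simp [pvNS, hc]

theorem pv_replace_space (cs : List Char) :
    PySem.Chars.replace cs [' '] [] = pvNS cs := by
  rw [PySem.Chars.replace]
  simp [pv_replace_go cs.length cs [] le_rfl]

theorem pvFill_append (m : List Char) : ∀ (q x : List Char),
    pvFill q (m ++ x) = pvFill q m ++ pvFill (q.drop (pvNS m).length) x := by
  induction m with
  | nil => intro q x; simp [pvFill, pvNS]
  | cons c t ih =>
    intro q x
    by_cases hc : c = ' '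
    · simp [pvFill, hc, ih, pvNS]
    · simp only [List.cons_append, pvFill, hc, if_neg, pvNS, List.filter_cons]
      have : (c != ' ') = true := by simpa using hc
      simp [this, ih, pvNS]

theorem pvFill_ext (m : List Char) : ∀ (q e : List Char), (pvNS m).length ≤ q.length →
    pvFill (q ++ e) m = pvFill q m := by
  induction m with
  | nil => intro q e h; simp [pvFill]
  | cons c t ih =>
    intro q e h
    by_cases hc : c = ' '
    · simp only [pvFill, hc, if_pos]
      rw [ih q e (by simpa [pvNS, hc] using h)]
    · have hq : q ≠ [] := by
        intro hq; subst hq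
        simp [pvNS, hc] at h
      simp only [pvFill, hc, if_neg]
      match q, hq with
      | a :: r, _ =>
        simp only [List.cons_append, List.headD, List.tail]
        rw [ih r e (by simp [pvNS, hc] at h ⊢; omega)]
        simp [pvFill, hc]

theorem pvFill_single (c : Char) : pvFill (pvNS [c]).reverse [c] = [c] := by
  by_cases hc : c = ' ' <;> simp [pvFill, pvNS, hc]

theorem pvFill_swap (a b : Char) (u : List Char) (ha : ¬ a = ' ') (hb : ¬ b = ' ') :
    pvFill (pvNS (a :: (u ++ [b]))).reverse (a :: (u ++ [b]))
      = b :: (pvFill (pvNS u).reverse u ++ [a]) := by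
  have hns : pvNS (a :: (u ++ [b])) = a :: (pvNS u ++ [b]) := by
    simp [pvNS, List.filter_append, ha, hb]
  rw [hns]
  simp only [List.reverse_cons, List.reverse_append, List.reverse_singleton]
  -- reverse = b :: (pvNS u).reverse ++ [a]
  have h1 : pvFill (b :: ((pvNS u).reverse ++ [a])) (a :: (u ++ [b]))
      = b :: pvFill ((pvNS u).reverse ++ [a]) (u ++ [b]) := by
    simp [pvFill, ha]
  rw [show ((List.nil (α := Char)).reverse ++ [b] ++ (pvNS u).reverse ++ [a]) = b :: ((pvNS u).reverse ++ [a]) by simp, h1]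
  rw [pvFill_append u ((pvNS u).reverse ++ [a]) [b]]
  rw [pvFill_ext u (pvNS u).reverse [a] (by simp)]
  have hdrop : ((pvNS u).reverse ++ [a]).drop (pvNS u).length = [a] := by
    simp
  rw [hdrop]
  simp [pvFill, hb]

theorem pv_foldA (cs : List Char) : ∀ (q acc : List Char) (k : Nat),
    (cs.foldl (fun (st : List Char × Int) c =>
        if c = ' ' then (st.1 ++ [' '], st.2)
        else (st.1 ++ [PySem.List.pyGetD q st.2 ' '], st.2 + 1)) (acc, (k : Int))).1
      = acc ++ pvFill (q.drop k) cs := by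
  induction cs with
  | nil => intro q acc k; simp [pvFill]
  | cons c t ih =>
    intro q acc k
    by_cases hc : c = ' '
    · simp only [List.foldl_cons, hc, if_pos]
      rw [ih q (acc ++ [' ']) k]
      simp [pvFill]
    · rw [List.foldl_cons, if_neg hc]
      have hg : PySem.List.pyGetD q (k : Int) ' ' = (q.drop k).headD ' ' := by
        simp [PySem.List.pyGetD_natCast, List.getD, List.headD_eq_head?, List.head?_drop]
      have hcast : ((k : Int) + 1) = ((k + 1 : Nat) : Int) := by push_cast; ring
      rw [hcast, ih q (acc ++ [PySem.List.pyGetD q (↑k) ' ']) (k + 1)]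
      simp [pvFill, hc, hg, List.tail_drop]
-- for i in range(len(s)): if s[i]==' ': output += ' ' else: output += q[iter]; iter += 1

theorem pv_solve_eq_fill (s : String) :
    solve s = String.ofList (pvFill (pvNS s.toList).reverse s.toList) := by
  unfold solve
  rw [PySem.Str.slice?_none_none_neg_one]
  simp only [Option.getD_some]
  have hq : (PySem.Str.replace (String.ofList s.toList.reverse) " " "").toList
      = (pvNS s.toList).reverse := by
    rw [PySem.Str.toList_replace]
    have : (String.ofList s.toList.reverse).toList = s.toList.reverse := by simp
    rw [this]
    rw [show (" ".toList) = [' '] from rfl, show ("".toList) = [] from rfl]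
    rw [pv_replace_space]
    simp [pvNS, List.filter_reverse]
  rw [hq]
  have hlen : PySem.Str.len s = ((s.toList.length : Nat) : Int) := by
    simp [PySem.Str.len]
  rw [hlen]
  rw [PySem.List.foldl_pyRange_zero_pyGetD' s.toList ' '
    (fun (st : List Char × Int) c =>
      if c = ' ' then (st.1 ++ [' '], st.2)
      else (st.1 ++ [PySem.List.pyGetD ((pvNS s.toList).reverse) st.2 ' '], st.2 + 1)) ([], 0)]
  rw [show ((0 : Int)) = ((0 : Nat) : Int) from rfl]
  rw [pv_foldA s.toList (pvNS s.toList).reverse [] 0]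
  simp

theorem pv_getD_append (pre l : List Char) (k : Nat) (d : Char) :
    (pre ++ l).getD (pre.length + k) d = l.getD k d := by
  simp [List.getD, List.getElem?_append_right (by omega : pre.length ≤ pre.length + k)]

theorem pv_set_append (pre l : List Char) (k : Nat) (v : Char) :
    (pre ++ l).set (pre.length + k) v = pre ++ l.set k v := by
  induction pre with
  | nil => simp
  | cons a t ih => simp [List.set, ih, Nat.succ_add]

theorem pv_loop_spec (n : Nat) : ∀ (pre mid post : List Char), mid.length ≤ n →
    solveAltLoop (pre ++ mid ++ post) pre.length (pre.length + mid.length - 1)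
      = pre ++ pvFill (pvNS mid).reverse mid ++ post := by
  induction n with
  | zero =>
    intro pre mid post h
    have : mid = [] := List.eq_nil_of_length_eq_zero (Nat.le_zero.mp h)
    subst this
    rw [solveAltLoop]
    simp [pvFill]
  | succ n ih =>
    intro pre mid post h
    match mid with
    | [] =>
      rw [solveAltLoop]; simp [pvFill]
    | [c] =>
      rw [solveAltLoop]; simp [pvFill_single]
    | a :: b :: t =>
      -- mid has length ≥ 2, so i < j
      have hij : pre.length < pre.length + (a :: b :: t).length - 1 := by simp
      rw [solveAltLoop, dif_pos hij]
      by_cases ha : a = ' '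
      · -- left end is a space: i += 1
        have hget : (pre ++ (a :: b :: t) ++ post).getD pre.length ' ' = a := by
          rw [List.append_assoc, show pre.length = pre.length + 0 from rfl, pv_getD_append]
          rfl
        rw [if_pos (by rw [hget]; exact ha)]
        have hre : pre ++ (a :: b :: t) ++ post = (pre ++ [a]) ++ (b :: t) ++ post := by simp
        have hlen1 : pre.length + 1 = (pre ++ [a]).length := by simp
        have hlen2 : pre.length + (a :: b :: t).length - 1
            = (pre ++ [a]).length + (b :: t).length - 1 := by simp; omega
        rw [hre, hlen1, hlen2, ih (pre ++ [a]) (b :: t) post (by simp at h ⊢; omega)]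
        subst ha
        simp [pvFill, pvNS]
      · -- left end not a space
        have hget : (pre ++ (a :: b :: t) ++ post).getD pre.length ' ' = a := by
          rw [List.append_assoc, show pre.length = pre.length + 0 from rfl, pv_getD_append]
          rfl
        rw [if_neg (by rw [hget]; exact ha)]
        obtain ⟨u, z, hz⟩ : ∃ u z, (b :: t) = u ++ [z] := by
          rcases List.eq_nil_or_concat' (b :: t) with hnil | ⟨u, z, huz⟩
          · simp at hnil
          · exact ⟨u, z, huz⟩
        have hul : t.length = u.length := by
          have := congrArg List.length hz; simpa using this
        rw [hz] at hget ⊢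
        -- j points at z, the last element of mid
        have hj : pre.length + (a :: (u ++ [z])).length - 1 = (pre ++ a :: u).length + 0 := by
          simp
        have hgj : (pre ++ (a :: (u ++ [z])) ++ post).getD ((pre ++ a :: u).length + 0) ' ' = z := by
          rw [show pre ++ (a :: (u ++ [z])) ++ post = (pre ++ a :: u) ++ ([z] ++ post) by simp,
            pv_getD_append]
          rfl
        by_cases hzsp : z = ' '
        · -- right end is a space: j -= 1
          rw [hj, if_pos (by rw [hgj]; exact hzsp)]
          have hre : pre ++ (a :: (u ++ [z])) ++ post = pre ++ (a :: u) ++ (z :: post) := by simp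
          have hj2 : (pre ++ a :: u).length + 0 - 1 = pre.length + (a :: u).length - 1 := by
            simp
          rw [hre, hj2, ih pre (a :: u) (z :: post) (by simp at h ⊢; omega)]
          subst hzsp
          have hns : pvNS (a :: (u ++ [' '])) = pvNS (a :: u) := by
            simp [pvNS, List.filter_cons, List.filter_append]
          rw [hns, show (a :: (u ++ [' '])) = (a :: u) ++ [' '] by simp,
            pvFill_append (a :: u) (pvNS (a :: u)).reverse [' ']]
          simp [pvFill]
        · -- swap branch
          rw [hj, if_neg (by rw [hgj]; exact hzsp)]
          rw [hget, hgj]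
          -- compute the two sets
          have hs1 : (pre ++ (a :: (u ++ [z])) ++ post).set pre.length z
              = pre ++ (z :: (u ++ [z])) ++ post := by
            rw [List.append_assoc, show pre.length = pre.length + 0 from rfl, pv_set_append]
            simp
          rw [hs1]
          have hs2 : (pre ++ (z :: (u ++ [z])) ++ post).set ((pre ++ a :: u).length + 0) a
              = (pre ++ [z]) ++ u ++ (a :: post) := by
            rw [show pre ++ (z :: (u ++ [z])) ++ post = (pre ++ z :: u) ++ ([z] ++ post) by simp]
            rw [show (pre ++ a :: u).length = (pre ++ z :: u).length by simp, pv_set_append]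
            simp
          rw [hs2]
          have hi2 : pre.length + 1 = (pre ++ [z]).length := by simp
          have hj3 : (pre ++ a :: u).length + 0 - 1 = (pre ++ [z]).length + u.length - 1 := by
            simp
          rw [hi2, hj3, ih (pre ++ [z]) u (a :: post) (by simp at h ⊢; omega)]
          rw [pvFill_swap a z u ha hzsp]
          simp

theorem pv_solve_alt_eq_fill (s : String) :
    solve_alt s = String.ofList (pvFill (pvNS s.toList).reverse s.toList) := by
  unfold solve_alt
  have := pv_loop_spec s.toList.length [] s.toList []
  simp only [List.nil_append, List.append_nil, List.length_nil, Nat.zero_add] at this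
  rw [this le_rfl]

-- ===== VERDICT (by name: the statement is the Claim_ definition above) =====
theorem solve_spec : Claim_equal_solve := by
  intro s _
  unfold Spec_solve
  rw [pv_solve_eq_fill, pv_solve_alt_eq_fill]
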